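-- pv_equiv track=rewrite | github.com/dsweet99/dryer | test/benchmark_data/module_006.py | compute_6_1
-- ===== SOURCE A (Python) =====
-- def compute_6_1(a, b, c):
--     x = a * 106 + b * 87
--     y = c * 74 - a * 57
--     for i in range(12):
--         x = x + i * 20
--         y = y - i * 9
--         if x > 5610:
--             x = x % 1305
--     return x + y + 7
-- ===== SOURCE B (Python) =====
-- def compute_6_1(a, b, c):
--     # Closed form: no state-updating loop. The mod branch can fire at most once
--     # (after it, x < 1305 and additions keep x <= 2624 < 5610), so find the
--     # first step k where x exceeds 5610 and assemble the result arithmetically.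
--     x0 = a * 106 + b * 87
--     y = c * 74 - a * 57 - 594
--     k = next((i for i in range(12) if x0 + 10 * i * (i + 1) > 5610), None)
--     if k is None:
--         x = x0 + 1320
--     else:
--         x = (x0 + 10 * k * (k + 1)) % 1305 + 20 * (66 - k * (k + 1) // 2)
--     return x + y + 7
-- ===== Notes on version B (the rewrite author's own statement) =====
-- stated objective: alternative
-- what changed: B eliminates the stateful loop: y is the closed form c*74 - a*57 - 594, and since the mod branch can fire at most once, B searches for the first step k where x0 + 10*k*(k+1) exceeds 5610 and assembles x arithmetically (one mod plus the remaining additions) instead of iterating two accumulators.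
import Mathlib
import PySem

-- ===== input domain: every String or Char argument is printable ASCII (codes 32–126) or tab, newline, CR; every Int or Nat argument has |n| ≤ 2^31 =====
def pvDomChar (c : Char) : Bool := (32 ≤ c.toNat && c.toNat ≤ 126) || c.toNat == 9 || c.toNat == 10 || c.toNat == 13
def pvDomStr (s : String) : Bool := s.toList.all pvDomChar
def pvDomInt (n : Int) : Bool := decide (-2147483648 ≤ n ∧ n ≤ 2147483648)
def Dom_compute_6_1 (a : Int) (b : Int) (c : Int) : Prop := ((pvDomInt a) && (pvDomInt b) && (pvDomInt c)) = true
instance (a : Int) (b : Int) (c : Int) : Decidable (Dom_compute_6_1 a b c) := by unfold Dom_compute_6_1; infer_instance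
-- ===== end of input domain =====

-- B replaces A's stateful loop by a closed form: the mod branch fires at most once, so B
-- searches for the single step where it fires and assembles the result arithmetically; objective: simpler.

-- ===== PORT A =====
def compute_6_1 (a : Int) (b : Int) (c : Int) : Int :=
  let x := a * 106 + b * 87
  let y := c * 74 - a * 57
  let xy := (PySem.List.pyRange 0 12 1).foldl
    (fun (s : Int × Int) i =>
      let x := s.1 + i * 20
      let y := s.2 - i * 9
      let x := if x > 5610 then PySem.Int.mod x 1305 else x
      (x, y)) (x, y)
  xy.1 + xy.2 + 7

-- ===== PORT B =====
-- helper: Source B's `next((i for i in range(12) if x0 + 10*i*(i+1) > 5610), None)`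
def pvFirstHot (x0 : Int) : Option Int :=
  (PySem.List.pyRange 0 12 1).find? (fun i => decide (x0 + 10 * i * (i + 1) > 5610))

def compute_6_1_alt (a : Int) (b : Int) (c : Int) : Int :=
  let x0 := a * 106 + b * 87
  let y := c * 74 - a * 57 - 594
  let x := match pvFirstHot x0 with
    | none => x0 + 1320
    | some k => PySem.Int.mod (x0 + 10 * k * (k + 1)) 1305
                  + 20 * (66 - PySem.Int.floordiv (k * (k + 1)) 2)
  x + y + 7

-- ===== PRECONDITION & SPEC =====
def Spec_compute_6_1 (a : Int) (b : Int) (c : Int) (out : Int) : Prop := out = compute_6_1_alt a b c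
instance (a : Int) (b : Int) (c : Int) (out : Int) : Decidable (Spec_compute_6_1 a b c out) := by unfold Spec_compute_6_1; infer_instance

-- ===== CLAIM (what is proved, stated in full; the proofs are below) =====
def Claim_equal_compute_6_1 : Prop := ∀ (a : Int) (b : Int) (c : Int), Dom_compute_6_1 a b c → Spec_compute_6_1 a b c (compute_6_1 a b c)

-- ===== LEMMAS AND PROOFS =====

-- A's x-update, as a named function (definitionally equal to the lambda in the port).
def pvStep (x i : Int) : Int :=
  if x + i * 20 > 5610 then PySem.Int.mod (x + i * 20) 1305 else x + i * 20

-- While the running x stays ≤ 5610 along the whole list, the loop only adds.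
theorem noMod (l : List Int) (x : Int) (hpos : ∀ i ∈ l, 0 ≤ i)
    (hb : x + 20 * l.sum ≤ 5610) : l.foldl pvStep x = x + 20 * l.sum := by
  induction l generalizing x with
  | nil => simp
  | cons i t ih =>
    have hi : 0 ≤ i := hpos i (by simp)
    have ht : 0 ≤ t.sum := List.sum_nonneg (fun j hj => hpos j (by simp [hj]))
    simp only [List.sum_cons] at hb ⊢
    rw [List.foldl_cons, show pvStep x i = x + i * 20 from if_neg (by omega),
        ih _ (fun j hj => hpos j (by simp [hj])) (by omega)]
    ring

theorem main_lemma (x0 : Int) :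
    (([0,1,2,3,4,5,6,7,8,9,10,11] : List Int)).foldl pvStep x0
    = (match pvFirstHot x0 with
       | none => x0 + 1320
       | some k => PySem.Int.mod (x0 + 10 * k * (k + 1)) 1305
                     + 20 * (66 - PySem.Int.floordiv (k * (k + 1)) 2)) := by
  have hr : PySem.List.pyRange 0 12 1 = ([0,1,2,3,4,5,6,7,8,9,10,11] : List Int) := by decide
  by_cases h0 : x0 + 10 * 0 * 1 > 5610
  · have hfind : pvFirstHot x0 = some 0 := by
      unfold pvFirstHot; rw [hr]
      rw [List.find?_cons_of_pos (p := fun i => decide (x0 + 10 * i * (i + 1) > 5610)) (decide_eq_true (by omega))]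
    rw [List.foldl_cons]
    rw [show pvStep x0 0 = PySem.Int.mod (x0 + 0 * 20) 1305 from if_pos (by omega)]
    have hm0 := PySem.Int.mod_nonneg (x0 + 0 * 20) (b := 1305) (by norm_num)
    have hm1 := PySem.Int.mod_lt (x0 + 0 * 20) (b := 1305) (by norm_num)
    rw [noMod [1,2,3,4,5,6,7,8,9,10,11] _ (by decide) (by simp only [List.sum_cons, List.sum_nil]; omega)]
    rw [show (([1,2,3,4,5,6,7,8,9,10,11] : List Int)).sum = 66 from by decide]
    simp only [hfind]
    rw [show PySem.Int.floordiv ((0 : Int) * (0 + 1)) 2 = 0 from by decide]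
    rw [show x0 + 0 * 20 = x0 + 10 * (0 : Int) * (0 + 1) from by ring]
    norm_num
  by_cases h1 : x0 + 10 * 1 * 2 > 5610
  · have hfind : pvFirstHot x0 = some 1 := by
      unfold pvFirstHot; rw [hr]
      rw [List.find?_cons_of_neg (p := fun i => decide (x0 + 10 * i * (i + 1) > 5610)) (fun h => absurd (of_decide_eq_true h) (by omega)),
          List.find?_cons_of_pos (p := fun i => decide (x0 + 10 * i * (i + 1) > 5610)) (decide_eq_true (by omega))]
    rw [show (([0,1,2,3,4,5,6,7,8,9,10,11] : List Int)) = [0] ++ (1 :: [2,3,4,5,6,7,8,9,10,11]) from rfl, List.foldl_append]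
    rw [noMod [0] x0 (by decide) (by simp only [List.sum_cons, List.sum_nil]; omega)]
    rw [show (([0] : List Int)).sum = 0 from by decide]
    rw [List.foldl_cons]
    rw [show pvStep (x0 + 20 * 0) 1 = PySem.Int.mod (x0 + 20 * 0 + 1 * 20) 1305 from if_pos (by omega)]
    have hm0 := PySem.Int.mod_nonneg (x0 + 20 * 0 + 1 * 20) (b := 1305) (by norm_num)
    have hm1 := PySem.Int.mod_lt (x0 + 20 * 0 + 1 * 20) (b := 1305) (by norm_num)
    rw [noMod [2,3,4,5,6,7,8,9,10,11] _ (by decide) (by simp only [List.sum_cons, List.sum_nil]; omega)]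
    rw [show (([2,3,4,5,6,7,8,9,10,11] : List Int)).sum = 65 from by decide]
    simp only [hfind]
    rw [show PySem.Int.floordiv ((1 : Int) * (1 + 1)) 2 = 1 from by decide]
    rw [show x0 + 20 * 0 + 1 * 20 = x0 + 10 * (1 : Int) * (1 + 1) from by ring]
    norm_num
  by_cases h2 : x0 + 10 * 2 * 3 > 5610
  · have hfind : pvFirstHot x0 = some 2 := by
      unfold pvFirstHot; rw [hr]
      rw [List.find?_cons_of_neg (p := fun i => decide (x0 + 10 * i * (i + 1) > 5610)) (fun h => absurd (of_decide_eq_true h) (by omega)),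
          List.find?_cons_of_neg (p := fun i => decide (x0 + 10 * i * (i + 1) > 5610)) (fun h => absurd (of_decide_eq_true h) (by omega)),
          List.find?_cons_of_pos (p := fun i => decide (x0 + 10 * i * (i + 1) > 5610)) (decide_eq_true (by omega))]
    rw [show (([0,1,2,3,4,5,6,7,8,9,10,11] : List Int)) = [0,1] ++ (2 :: [3,4,5,6,7,8,9,10,11]) from rfl, List.foldl_append]
    rw [noMod [0,1] x0 (by decide) (by simp only [List.sum_cons, List.sum_nil]; omega)]
    rw [show (([0,1] : List Int)).sum = 1 from by decide]
    rw [List.foldl_cons]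
    rw [show pvStep (x0 + 20 * 1) 2 = PySem.Int.mod (x0 + 20 * 1 + 2 * 20) 1305 from if_pos (by omega)]
    have hm0 := PySem.Int.mod_nonneg (x0 + 20 * 1 + 2 * 20) (b := 1305) (by norm_num)
    have hm1 := PySem.Int.mod_lt (x0 + 20 * 1 + 2 * 20) (b := 1305) (by norm_num)
    rw [noMod [3,4,5,6,7,8,9,10,11] _ (by decide) (by simp only [List.sum_cons, List.sum_nil]; omega)]
    rw [show (([3,4,5,6,7,8,9,10,11] : List Int)).sum = 63 from by decide]
    simp only [hfind]
    rw [show PySem.Int.floordiv ((2 : Int) * (2 + 1)) 2 = 3 from by decide]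
    rw [show x0 + 20 * 1 + 2 * 20 = x0 + 10 * (2 : Int) * (2 + 1) from by ring]
    norm_num
  by_cases h3 : x0 + 10 * 3 * 4 > 5610
  · have hfind : pvFirstHot x0 = some 3 := by
      unfold pvFirstHot; rw [hr]
      rw [List.find?_cons_of_neg (p := fun i => decide (x0 + 10 * i * (i + 1) > 5610)) (fun h => absurd (of_decide_eq_true h) (by omega)),
          List.find?_cons_of_neg (p := fun i => decide (x0 + 10 * i * (i + 1) > 5610)) (fun h => absurd (of_decide_eq_true h) (by omega)),
          List.find?_cons_of_neg (p := fun i => decide (x0 + 10 * i * (i + 1) > 5610)) (fun h => absurd (of_decide_eq_true h) (by omega)),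
          List.find?_cons_of_pos (p := fun i => decide (x0 + 10 * i * (i + 1) > 5610)) (decide_eq_true (by omega))]
    rw [show (([0,1,2,3,4,5,6,7,8,9,10,11] : List Int)) = [0,1,2] ++ (3 :: [4,5,6,7,8,9,10,11]) from rfl, List.foldl_append]
    rw [noMod [0,1,2] x0 (by decide) (by simp only [List.sum_cons, List.sum_nil]; omega)]
    rw [show (([0,1,2] : List Int)).sum = 3 from by decide]
    rw [List.foldl_cons]
    rw [show pvStep (x0 + 20 * 3) 3 = PySem.Int.mod (x0 + 20 * 3 + 3 * 20) 1305 from if_pos (by omega)]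
    have hm0 := PySem.Int.mod_nonneg (x0 + 20 * 3 + 3 * 20) (b := 1305) (by norm_num)
    have hm1 := PySem.Int.mod_lt (x0 + 20 * 3 + 3 * 20) (b := 1305) (by norm_num)
    rw [noMod [4,5,6,7,8,9,10,11] _ (by decide) (by simp only [List.sum_cons, List.sum_nil]; omega)]
    rw [show (([4,5,6,7,8,9,10,11] : List Int)).sum = 60 from by decide]
    simp only [hfind]
    rw [show PySem.Int.floordiv ((3 : Int) * (3 + 1)) 2 = 6 from by decide]
    rw [show x0 + 20 * 3 + 3 * 20 = x0 + 10 * (3 : Int) * (3 + 1) from by ring]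
    norm_num
  by_cases h4 : x0 + 10 * 4 * 5 > 5610
  · have hfind : pvFirstHot x0 = some 4 := by
      unfold pvFirstHot; rw [hr]
      rw [List.find?_cons_of_neg (p := fun i => decide (x0 + 10 * i * (i + 1) > 5610)) (fun h => absurd (of_decide_eq_true h) (by omega)),
          List.find?_cons_of_neg (p := fun i => decide (x0 + 10 * i * (i + 1) > 5610)) (fun h => absurd (of_decide_eq_true h) (by omega)),
          List.find?_cons_of_neg (p := fun i => decide (x0 + 10 * i * (i + 1) > 5610)) (fun h => absurd (of_decide_eq_true h) (by omega)),
          List.find?_cons_of_neg (p := fun i => decide (x0 + 10 * i * (i + 1) > 5610)) (fun h => absurd (of_decide_eq_true h) (by omega)),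
          List.find?_cons_of_pos (p := fun i => decide (x0 + 10 * i * (i + 1) > 5610)) (decide_eq_true (by omega))]
    rw [show (([0,1,2,3,4,5,6,7,8,9,10,11] : List Int)) = [0,1,2,3] ++ (4 :: [5,6,7,8,9,10,11]) from rfl, List.foldl_append]
    rw [noMod [0,1,2,3] x0 (by decide) (by simp only [List.sum_cons, List.sum_nil]; omega)]
    rw [show (([0,1,2,3] : List Int)).sum = 6 from by decide]
    rw [List.foldl_cons]
    rw [show pvStep (x0 + 20 * 6) 4 = PySem.Int.mod (x0 + 20 * 6 + 4 * 20) 1305 from if_pos (by omega)]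
    have hm0 := PySem.Int.mod_nonneg (x0 + 20 * 6 + 4 * 20) (b := 1305) (by norm_num)
    have hm1 := PySem.Int.mod_lt (x0 + 20 * 6 + 4 * 20) (b := 1305) (by norm_num)
    rw [noMod [5,6,7,8,9,10,11] _ (by decide) (by simp only [List.sum_cons, List.sum_nil]; omega)]
    rw [show (([5,6,7,8,9,10,11] : List Int)).sum = 56 from by decide]
    simp only [hfind]
    rw [show PySem.Int.floordiv ((4 : Int) * (4 + 1)) 2 = 10 from by decide]
    rw [show x0 + 20 * 6 + 4 * 20 = x0 + 10 * (4 : Int) * (4 + 1) from by ring]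
    norm_num
  by_cases h5 : x0 + 10 * 5 * 6 > 5610
  · have hfind : pvFirstHot x0 = some 5 := by
      unfold pvFirstHot; rw [hr]
      rw [List.find?_cons_of_neg (p := fun i => decide (x0 + 10 * i * (i + 1) > 5610)) (fun h => absurd (of_decide_eq_true h) (by omega)),
          List.find?_cons_of_neg (p := fun i => decide (x0 + 10 * i * (i + 1) > 5610)) (fun h => absurd (of_decide_eq_true h) (by omega)),
          List.find?_cons_of_neg (p := fun i => decide (x0 + 10 * i * (i + 1) > 5610)) (fun h => absurd (of_decide_eq_true h) (by omega)),
          List.find?_cons_of_neg (p := fun i => decide (x0 + 10 * i * (i + 1) > 5610)) (fun h => absurd (of_decide_eq_true h) (by omega)),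
          List.find?_cons_of_neg (p := fun i => decide (x0 + 10 * i * (i + 1) > 5610)) (fun h => absurd (of_decide_eq_true h) (by omega)),
          List.find?_cons_of_pos (p := fun i => decide (x0 + 10 * i * (i + 1) > 5610)) (decide_eq_true (by omega))]
    rw [show (([0,1,2,3,4,5,6,7,8,9,10,11] : List Int)) = [0,1,2,3,4] ++ (5 :: [6,7,8,9,10,11]) from rfl, List.foldl_append]
    rw [noMod [0,1,2,3,4] x0 (by decide) (by simp only [List.sum_cons, List.sum_nil]; omega)]
    rw [show (([0,1,2,3,4] : List Int)).sum = 10 from by decide]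
    rw [List.foldl_cons]
    rw [show pvStep (x0 + 20 * 10) 5 = PySem.Int.mod (x0 + 20 * 10 + 5 * 20) 1305 from if_pos (by omega)]
    have hm0 := PySem.Int.mod_nonneg (x0 + 20 * 10 + 5 * 20) (b := 1305) (by norm_num)
    have hm1 := PySem.Int.mod_lt (x0 + 20 * 10 + 5 * 20) (b := 1305) (by norm_num)
    rw [noMod [6,7,8,9,10,11] _ (by decide) (by simp only [List.sum_cons, List.sum_nil]; omega)]
    rw [show (([6,7,8,9,10,11] : List Int)).sum = 51 from by decide]
    simp only [hfind]
    rw [show PySem.Int.floordiv ((5 : Int) * (5 + 1)) 2 = 15 from by decide]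
    rw [show x0 + 20 * 10 + 5 * 20 = x0 + 10 * (5 : Int) * (5 + 1) from by ring]
    norm_num
  by_cases h6 : x0 + 10 * 6 * 7 > 5610
  · have hfind : pvFirstHot x0 = some 6 := by
      unfold pvFirstHot; rw [hr]
      rw [List.find?_cons_of_neg (p := fun i => decide (x0 + 10 * i * (i + 1) > 5610)) (fun h => absurd (of_decide_eq_true h) (by omega)),
          List.find?_cons_of_neg (p := fun i => decide (x0 + 10 * i * (i + 1) > 5610)) (fun h => absurd (of_decide_eq_true h) (by omega)),
          List.find?_cons_of_neg (p := fun i => decide (x0 + 10 * i * (i + 1) > 5610)) (fun h => absurd (of_decide_eq_true h) (by omega)),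
          List.find?_cons_of_neg (p := fun i => decide (x0 + 10 * i * (i + 1) > 5610)) (fun h => absurd (of_decide_eq_true h) (by omega)),
          List.find?_cons_of_neg (p := fun i => decide (x0 + 10 * i * (i + 1) > 5610)) (fun h => absurd (of_decide_eq_true h) (by omega)),
          List.find?_cons_of_neg (p := fun i => decide (x0 + 10 * i * (i + 1) > 5610)) (fun h => absurd (of_decide_eq_true h) (by omega)),
          List.find?_cons_of_pos (p := fun i => decide (x0 + 10 * i * (i + 1) > 5610)) (decide_eq_true (by omega))]
    rw [show (([0,1,2,3,4,5,6,7,8,9,10,11] : List Int)) = [0,1,2,3,4,5] ++ (6 :: [7,8,9,10,11]) from rfl, List.foldl_append]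
    rw [noMod [0,1,2,3,4,5] x0 (by decide) (by simp only [List.sum_cons, List.sum_nil]; omega)]
    rw [show (([0,1,2,3,4,5] : List Int)).sum = 15 from by decide]
    rw [List.foldl_cons]
    rw [show pvStep (x0 + 20 * 15) 6 = PySem.Int.mod (x0 + 20 * 15 + 6 * 20) 1305 from if_pos (by omega)]
    have hm0 := PySem.Int.mod_nonneg (x0 + 20 * 15 + 6 * 20) (b := 1305) (by norm_num)
    have hm1 := PySem.Int.mod_lt (x0 + 20 * 15 + 6 * 20) (b := 1305) (by norm_num)
    rw [noMod [7,8,9,10,11] _ (by decide) (by simp only [List.sum_cons, List.sum_nil]; omega)]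
    rw [show (([7,8,9,10,11] : List Int)).sum = 45 from by decide]
    simp only [hfind]
    rw [show PySem.Int.floordiv ((6 : Int) * (6 + 1)) 2 = 21 from by decide]
    rw [show x0 + 20 * 15 + 6 * 20 = x0 + 10 * (6 : Int) * (6 + 1) from by ring]
    norm_num
  by_cases h7 : x0 + 10 * 7 * 8 > 5610
  · have hfind : pvFirstHot x0 = some 7 := by
      unfold pvFirstHot; rw [hr]
      rw [List.find?_cons_of_neg (p := fun i => decide (x0 + 10 * i * (i + 1) > 5610)) (fun h => absurd (of_decide_eq_true h) (by omega)),
          List.find?_cons_of_neg (p := fun i => decide (x0 + 10 * i * (i + 1) > 5610)) (fun h => absurd (of_decide_eq_true h) (by omega)),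
          List.find?_cons_of_neg (p := fun i => decide (x0 + 10 * i * (i + 1) > 5610)) (fun h => absurd (of_decide_eq_true h) (by omega)),
          List.find?_cons_of_neg (p := fun i => decide (x0 + 10 * i * (i + 1) > 5610)) (fun h => absurd (of_decide_eq_true h) (by omega)),
          List.find?_cons_of_neg (p := fun i => decide (x0 + 10 * i * (i + 1) > 5610)) (fun h => absurd (of_decide_eq_true h) (by omega)),
          List.find?_cons_of_neg (p := fun i => decide (x0 + 10 * i * (i + 1) > 5610)) (fun h => absurd (of_decide_eq_true h) (by omega)),
          List.find?_cons_of_neg (p := fun i => decide (x0 + 10 * i * (i + 1) > 5610)) (fun h => absurd (of_decide_eq_true h) (by omega)),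
          List.find?_cons_of_pos (p := fun i => decide (x0 + 10 * i * (i + 1) > 5610)) (decide_eq_true (by omega))]
    rw [show (([0,1,2,3,4,5,6,7,8,9,10,11] : List Int)) = [0,1,2,3,4,5,6] ++ (7 :: [8,9,10,11]) from rfl, List.foldl_append]
    rw [noMod [0,1,2,3,4,5,6] x0 (by decide) (by simp only [List.sum_cons, List.sum_nil]; omega)]
    rw [show (([0,1,2,3,4,5,6] : List Int)).sum = 21 from by decide]
    rw [List.foldl_cons]
    rw [show pvStep (x0 + 20 * 21) 7 = PySem.Int.mod (x0 + 20 * 21 + 7 * 20) 1305 from if_pos (by omega)]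
    have hm0 := PySem.Int.mod_nonneg (x0 + 20 * 21 + 7 * 20) (b := 1305) (by norm_num)
    have hm1 := PySem.Int.mod_lt (x0 + 20 * 21 + 7 * 20) (b := 1305) (by norm_num)
    rw [noMod [8,9,10,11] _ (by decide) (by simp only [List.sum_cons, List.sum_nil]; omega)]
    rw [show (([8,9,10,11] : List Int)).sum = 38 from by decide]
    simp only [hfind]
    rw [show PySem.Int.floordiv ((7 : Int) * (7 + 1)) 2 = 28 from by decide]
    rw [show x0 + 20 * 21 + 7 * 20 = x0 + 10 * (7 : Int) * (7 + 1) from by ring]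
    norm_num
  by_cases h8 : x0 + 10 * 8 * 9 > 5610
  · have hfind : pvFirstHot x0 = some 8 := by
      unfold pvFirstHot; rw [hr]
      rw [List.find?_cons_of_neg (p := fun i => decide (x0 + 10 * i * (i + 1) > 5610)) (fun h => absurd (of_decide_eq_true h) (by omega)),
          List.find?_cons_of_neg (p := fun i => decide (x0 + 10 * i * (i + 1) > 5610)) (fun h => absurd (of_decide_eq_true h) (by omega)),
          List.find?_cons_of_neg (p := fun i => decide (x0 + 10 * i * (i + 1) > 5610)) (fun h => absurd (of_decide_eq_true h) (by omega)),
          List.find?_cons_of_neg (p := fun i => decide (x0 + 10 * i * (i + 1) > 5610)) (fun h => absurd (of_decide_eq_true h) (by omega)),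
          List.find?_cons_of_neg (p := fun i => decide (x0 + 10 * i * (i + 1) > 5610)) (fun h => absurd (of_decide_eq_true h) (by omega)),
          List.find?_cons_of_neg (p := fun i => decide (x0 + 10 * i * (i + 1) > 5610)) (fun h => absurd (of_decide_eq_true h) (by omega)),
          List.find?_cons_of_neg (p := fun i => decide (x0 + 10 * i * (i + 1) > 5610)) (fun h => absurd (of_decide_eq_true h) (by omega)),
          List.find?_cons_of_neg (p := fun i => decide (x0 + 10 * i * (i + 1) > 5610)) (fun h => absurd (of_decide_eq_true h) (by omega)),
          List.find?_cons_of_pos (p := fun i => decide (x0 + 10 * i * (i + 1) > 5610)) (decide_eq_true (by omega))]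
    rw [show (([0,1,2,3,4,5,6,7,8,9,10,11] : List Int)) = [0,1,2,3,4,5,6,7] ++ (8 :: [9,10,11]) from rfl, List.foldl_append]
    rw [noMod [0,1,2,3,4,5,6,7] x0 (by decide) (by simp only [List.sum_cons, List.sum_nil]; omega)]
    rw [show (([0,1,2,3,4,5,6,7] : List Int)).sum = 28 from by decide]
    rw [List.foldl_cons]
    rw [show pvStep (x0 + 20 * 28) 8 = PySem.Int.mod (x0 + 20 * 28 + 8 * 20) 1305 from if_pos (by omega)]
    have hm0 := PySem.Int.mod_nonneg (x0 + 20 * 28 + 8 * 20) (b := 1305) (by norm_num)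
    have hm1 := PySem.Int.mod_lt (x0 + 20 * 28 + 8 * 20) (b := 1305) (by norm_num)
    rw [noMod [9,10,11] _ (by decide) (by simp only [List.sum_cons, List.sum_nil]; omega)]
    rw [show (([9,10,11] : List Int)).sum = 30 from by decide]
    simp only [hfind]
    rw [show PySem.Int.floordiv ((8 : Int) * (8 + 1)) 2 = 36 from by decide]
    rw [show x0 + 20 * 28 + 8 * 20 = x0 + 10 * (8 : Int) * (8 + 1) from by ring]
    norm_num
  by_cases h9 : x0 + 10 * 9 * 10 > 5610
  · have hfind : pvFirstHot x0 = some 9 := by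
      unfold pvFirstHot; rw [hr]
      rw [List.find?_cons_of_neg (p := fun i => decide (x0 + 10 * i * (i + 1) > 5610)) (fun h => absurd (of_decide_eq_true h) (by omega)),
          List.find?_cons_of_neg (p := fun i => decide (x0 + 10 * i * (i + 1) > 5610)) (fun h => absurd (of_decide_eq_true h) (by omega)),
          List.find?_cons_of_neg (p := fun i => decide (x0 + 10 * i * (i + 1) > 5610)) (fun h => absurd (of_decide_eq_true h) (by omega)),
          List.find?_cons_of_neg (p := fun i => decide (x0 + 10 * i * (i + 1) > 5610)) (fun h => absurd (of_decide_eq_true h) (by omega)),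
          List.find?_cons_of_neg (p := fun i => decide (x0 + 10 * i * (i + 1) > 5610)) (fun h => absurd (of_decide_eq_true h) (by omega)),
          List.find?_cons_of_neg (p := fun i => decide (x0 + 10 * i * (i + 1) > 5610)) (fun h => absurd (of_decide_eq_true h) (by omega)),
          List.find?_cons_of_neg (p := fun i => decide (x0 + 10 * i * (i + 1) > 5610)) (fun h => absurd (of_decide_eq_true h) (by omega)),
          List.find?_cons_of_neg (p := fun i => decide (x0 + 10 * i * (i + 1) > 5610)) (fun h => absurd (of_decide_eq_true h) (by omega)),
          List.find?_cons_of_neg (p := fun i => decide (x0 + 10 * i * (i + 1) > 5610)) (fun h => absurd (of_decide_eq_true h) (by omega)),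
          List.find?_cons_of_pos (p := fun i => decide (x0 + 10 * i * (i + 1) > 5610)) (decide_eq_true (by omega))]
    rw [show (([0,1,2,3,4,5,6,7,8,9,10,11] : List Int)) = [0,1,2,3,4,5,6,7,8] ++ (9 :: [10,11]) from rfl, List.foldl_append]
    rw [noMod [0,1,2,3,4,5,6,7,8] x0 (by decide) (by simp only [List.sum_cons, List.sum_nil]; omega)]
    rw [show (([0,1,2,3,4,5,6,7,8] : List Int)).sum = 36 from by decide]
    rw [List.foldl_cons]
    rw [show pvStep (x0 + 20 * 36) 9 = PySem.Int.mod (x0 + 20 * 36 + 9 * 20) 1305 from if_pos (by omega)]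
    have hm0 := PySem.Int.mod_nonneg (x0 + 20 * 36 + 9 * 20) (b := 1305) (by norm_num)
    have hm1 := PySem.Int.mod_lt (x0 + 20 * 36 + 9 * 20) (b := 1305) (by norm_num)
    rw [noMod [10,11] _ (by decide) (by simp only [List.sum_cons, List.sum_nil]; omega)]
    rw [show (([10,11] : List Int)).sum = 21 from by decide]
    simp only [hfind]
    rw [show PySem.Int.floordiv ((9 : Int) * (9 + 1)) 2 = 45 from by decide]
    rw [show x0 + 20 * 36 + 9 * 20 = x0 + 10 * (9 : Int) * (9 + 1) from by ring]
    norm_num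
  by_cases h10 : x0 + 10 * 10 * 11 > 5610
  · have hfind : pvFirstHot x0 = some 10 := by
      unfold pvFirstHot; rw [hr]
      rw [List.find?_cons_of_neg (p := fun i => decide (x0 + 10 * i * (i + 1) > 5610)) (fun h => absurd (of_decide_eq_true h) (by omega)),
          List.find?_cons_of_neg (p := fun i => decide (x0 + 10 * i * (i + 1) > 5610)) (fun h => absurd (of_decide_eq_true h) (by omega)),
          List.find?_cons_of_neg (p := fun i => decide (x0 + 10 * i * (i + 1) > 5610)) (fun h => absurd (of_decide_eq_true h) (by omega)),
          List.find?_cons_of_neg (p := fun i => decide (x0 + 10 * i * (i + 1) > 5610)) (fun h => absurd (of_decide_eq_true h) (by omega)),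
          List.find?_cons_of_neg (p := fun i => decide (x0 + 10 * i * (i + 1) > 5610)) (fun h => absurd (of_decide_eq_true h) (by omega)),
          List.find?_cons_of_neg (p := fun i => decide (x0 + 10 * i * (i + 1) > 5610)) (fun h => absurd (of_decide_eq_true h) (by omega)),
          List.find?_cons_of_neg (p := fun i => decide (x0 + 10 * i * (i + 1) > 5610)) (fun h => absurd (of_decide_eq_true h) (by omega)),
          List.find?_cons_of_neg (p := fun i => decide (x0 + 10 * i * (i + 1) > 5610)) (fun h => absurd (of_decide_eq_true h) (by omega)),
          List.find?_cons_of_neg (p := fun i => decide (x0 + 10 * i * (i + 1) > 5610)) (fun h => absurd (of_decide_eq_true h) (by omega)),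
          List.find?_cons_of_neg (p := fun i => decide (x0 + 10 * i * (i + 1) > 5610)) (fun h => absurd (of_decide_eq_true h) (by omega)),
          List.find?_cons_of_pos (p := fun i => decide (x0 + 10 * i * (i + 1) > 5610)) (decide_eq_true (by omega))]
    rw [show (([0,1,2,3,4,5,6,7,8,9,10,11] : List Int)) = [0,1,2,3,4,5,6,7,8,9] ++ (10 :: [11]) from rfl, List.foldl_append]
    rw [noMod [0,1,2,3,4,5,6,7,8,9] x0 (by decide) (by simp only [List.sum_cons, List.sum_nil]; omega)]
    rw [show (([0,1,2,3,4,5,6,7,8,9] : List Int)).sum = 45 from by decide]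
    rw [List.foldl_cons]
    rw [show pvStep (x0 + 20 * 45) 10 = PySem.Int.mod (x0 + 20 * 45 + 10 * 20) 1305 from if_pos (by omega)]
    have hm0 := PySem.Int.mod_nonneg (x0 + 20 * 45 + 10 * 20) (b := 1305) (by norm_num)
    have hm1 := PySem.Int.mod_lt (x0 + 20 * 45 + 10 * 20) (b := 1305) (by norm_num)
    rw [noMod [11] _ (by decide) (by simp only [List.sum_cons, List.sum_nil]; omega)]
    rw [show (([11] : List Int)).sum = 11 from by decide]
    simp only [hfind]
    rw [show PySem.Int.floordiv ((10 : Int) * (10 + 1)) 2 = 55 from by decide]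
    rw [show x0 + 20 * 45 + 10 * 20 = x0 + 10 * (10 : Int) * (10 + 1) from by ring]
    norm_num
  by_cases h11 : x0 + 10 * 11 * 12 > 5610
  · have hfind : pvFirstHot x0 = some 11 := by
      unfold pvFirstHot; rw [hr]
      rw [List.find?_cons_of_neg (p := fun i => decide (x0 + 10 * i * (i + 1) > 5610)) (fun h => absurd (of_decide_eq_true h) (by omega)),
          List.find?_cons_of_neg (p := fun i => decide (x0 + 10 * i * (i + 1) > 5610)) (fun h => absurd (of_decide_eq_true h) (by omega)),
          List.find?_cons_of_neg (p := fun i => decide (x0 + 10 * i * (i + 1) > 5610)) (fun h => absurd (of_decide_eq_true h) (by omega)),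
          List.find?_cons_of_neg (p := fun i => decide (x0 + 10 * i * (i + 1) > 5610)) (fun h => absurd (of_decide_eq_true h) (by omega)),
          List.find?_cons_of_neg (p := fun i => decide (x0 + 10 * i * (i + 1) > 5610)) (fun h => absurd (of_decide_eq_true h) (by omega)),
          List.find?_cons_of_neg (p := fun i => decide (x0 + 10 * i * (i + 1) > 5610)) (fun h => absurd (of_decide_eq_true h) (by omega)),
          List.find?_cons_of_neg (p := fun i => decide (x0 + 10 * i * (i + 1) > 5610)) (fun h => absurd (of_decide_eq_true h) (by omega)),
          List.find?_cons_of_neg (p := fun i => decide (x0 + 10 * i * (i + 1) > 5610)) (fun h => absurd (of_decide_eq_true h) (by omega)),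
          List.find?_cons_of_neg (p := fun i => decide (x0 + 10 * i * (i + 1) > 5610)) (fun h => absurd (of_decide_eq_true h) (by omega)),
          List.find?_cons_of_neg (p := fun i => decide (x0 + 10 * i * (i + 1) > 5610)) (fun h => absurd (of_decide_eq_true h) (by omega)),
          List.find?_cons_of_neg (p := fun i => decide (x0 + 10 * i * (i + 1) > 5610)) (fun h => absurd (of_decide_eq_true h) (by omega)),
          List.find?_cons_of_pos (p := fun i => decide (x0 + 10 * i * (i + 1) > 5610)) (decide_eq_true (by omega))]
    rw [show (([0,1,2,3,4,5,6,7,8,9,10,11] : List Int)) = [0,1,2,3,4,5,6,7,8,9,10] ++ (11 :: []) from rfl, List.foldl_append]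
    rw [noMod [0,1,2,3,4,5,6,7,8,9,10] x0 (by decide) (by simp only [List.sum_cons, List.sum_nil]; omega)]
    rw [show (([0,1,2,3,4,5,6,7,8,9,10] : List Int)).sum = 55 from by decide]
    rw [List.foldl_cons]
    rw [show pvStep (x0 + 20 * 55) 11 = PySem.Int.mod (x0 + 20 * 55 + 11 * 20) 1305 from if_pos (by omega)]
    have hm0 := PySem.Int.mod_nonneg (x0 + 20 * 55 + 11 * 20) (b := 1305) (by norm_num)
    have hm1 := PySem.Int.mod_lt (x0 + 20 * 55 + 11 * 20) (b := 1305) (by norm_num)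
    simp only [hfind]
    rw [show PySem.Int.floordiv ((11 : Int) * (11 + 1)) 2 = 66 from by decide]
    rw [show x0 + 20 * 55 + 11 * 20 = x0 + 10 * (11 : Int) * (11 + 1) from by ring]
    norm_num
  · have hfind : pvFirstHot x0 = none := by
      unfold pvFirstHot; rw [hr]
      simp only [List.find?_eq_none, decide_eq_true_eq]
      intro i hi; fin_cases hi <;> omega
    rw [noMod [0,1,2,3,4,5,6,7,8,9,10,11] x0 (by decide) (by simp only [List.sum_cons, List.sum_nil]; omega)]
    rw [show (([0,1,2,3,4,5,6,7,8,9,10,11] : List Int)).sum = 66 from by decide]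
    simp only [hfind]
    norm_num

-- A's dual-accumulator fold in terms of the x-only fold and the y sum.
theorem pair_fold_gen (l : List Int) (x y : Int) :
    l.foldl
      (fun (s : Int × Int) i =>
        let x := s.1 + i * 20
        let y := s.2 - i * 9
        let x := if x > 5610 then PySem.Int.mod x 1305 else x
        (x, y)) (x, y)
    = (l.foldl pvStep x, y - (l.map (fun i => i * 9)).sum) := by
  induction l generalizing x y with
  | nil => simp
  | cons h t ih =>
    simp only [List.foldl_cons, List.map_cons, List.sum_cons, ih]
    rw [show pvStep x h = if x + h * 20 > 5610 then PySem.Int.mod (x + h * 20) 1305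
          else x + h * 20 from rfl]
    ring_nf

-- ===== VERDICT (by name: the statement is the Claim_ definition above) =====
theorem compute_6_1_spec : Claim_equal_compute_6_1 := by
  intro a b c _
  unfold Spec_compute_6_1
  have hr : PySem.List.pyRange 0 12 1 = ([0,1,2,3,4,5,6,7,8,9,10,11] : List Int) := by decide
  simp only [compute_6_1, compute_6_1_alt, hr]
  rw [pair_fold_gen, main_lemma]
  rw [show (([0,1,2,3,4,5,6,7,8,9,10,11] : List Int).map (fun i => i * 9)).sum = 594 from by decide]
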